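-- pv_equiv track=rewrite | github.com/Cowboyserg/test-ships | logic.py | delete_extra
-- ===== SOURCE A (Python) =====
-- def delete_extra(mas1:list, mas2:list) -> tuple:
--     """Удаляет лишние данные из списков"""
--     dic = {}
--     mas_skip = []
--     for i in range(len(mas1)):
--         if i not in mas_skip:
--             if mas1[i][1] != mas2[i][1]:
--                 skip = [mas1[i][0], mas1[i][1]]
--                 for j in range(i + 1, len(mas1)):
--                     if [mas1[j][0], mas1[j][1]] == skip:
--                         mas_skip.append(j)
--                     else:
--                         break
--     mas1_new = []
--     mas2_new = []
--     for i in range(len(mas1)):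
--         if i not in mas_skip:
--             mas1_new.append(mas1[i])
--             mas2_new.append(mas2[i])
--     return mas1_new, mas2_new
-- ===== SOURCE B (Python) =====
-- def delete_extra(mas1: list, mas2: list) -> tuple:
--     """Single forward pass: keep each row, and while the last kept row was a
--     mismatch, drop the consecutive following rows with the same (id, value) pair."""
--     mas1_new = []
--     mas2_new = []
--     skipping = False
--     proto = None
--     for i in range(len(mas1)):
--         row = mas1[i]
--         if skipping and [row[0], row[1]] == proto:
--             continue
--         mas1_new.append(row)
--         mas2_new.append(mas2[i])
--         if row[1] != mas2[i][1]:
--             proto = [row[0], row[1]]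
--             skipping = True
--         else:
--             skipping = False
--     return mas1_new, mas2_new
-- ===== Notes on version B (the rewrite author's own statement) =====
-- stated objective: simpler
-- what changed: Replaces A's two-phase scheme (building a mas_skip index table with a nested forward scan, then a second filtering loop) by one forward pass that emits both result lists directly, carrying only a 'skipping' flag and the (id,value) pair of the last kept mismatch row.
-- outside the precondition, e.g. on delete_extra([[1, 2], [1, 2]], [[1, 3]]): A returns ([[1, 2]], [[1, 3]]), B returns ([[1, 2]], [[1, 3]]); on delete_extra([[1, 2], [1, 2]], [[1, 3], [5]]): A returns ([[1, 2]], [[1, 3]]), B returns ([[1, 2]], [[1, 3]])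
import Mathlib
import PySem

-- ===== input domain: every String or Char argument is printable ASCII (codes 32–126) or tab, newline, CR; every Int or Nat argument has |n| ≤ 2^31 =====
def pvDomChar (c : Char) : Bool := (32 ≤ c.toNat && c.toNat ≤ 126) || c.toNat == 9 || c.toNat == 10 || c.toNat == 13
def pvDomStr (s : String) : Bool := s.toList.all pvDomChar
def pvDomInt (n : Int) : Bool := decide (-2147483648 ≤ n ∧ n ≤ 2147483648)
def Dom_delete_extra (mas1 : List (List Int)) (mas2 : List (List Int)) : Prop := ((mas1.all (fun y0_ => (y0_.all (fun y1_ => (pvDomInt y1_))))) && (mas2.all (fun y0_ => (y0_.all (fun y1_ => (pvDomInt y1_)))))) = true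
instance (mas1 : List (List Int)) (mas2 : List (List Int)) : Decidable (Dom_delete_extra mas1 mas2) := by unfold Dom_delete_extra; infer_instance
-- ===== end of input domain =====

-- B replaces A's mas_skip index table + nested forward scan + second filtering loop by one
-- forward pass producing both result lists directly (objective: simpler).

-- ===== PORT A =====
-- mas[i][k] for in-range i,k (Pre_ guarantees in-range; defaults are never reached there)
def rowGet (mas : List (List Int)) (i : Nat) (k : Nat) : Int := (mas.getD i []).getD k 0

-- the Python list [mas1[i][0], mas1[i][1]]
def keyAt (mas1 : List (List Int)) (i : Nat) : List Int := [rowGet mas1 i 0, rowGet mas1 i 1]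

-- A's inner 'for j in range(i+1, len(mas1)) … else break' scan
def innerA (mas1 : List (List Int)) (skip : List Int) (j : Nat) : List Nat :=
  if _h : j < mas1.length then
    if keyAt mas1 j = skip then j :: innerA mas1 skip (j + 1) else []
  else []
termination_by mas1.length - j

-- body of A's first loop (mas_skip accumulator)
def stepSkip (mas1 : List (List Int)) (mas2 : List (List Int)) (sk : List Nat) (i : Nat) : List Nat :=
  if i ∈ sk then sk
  else if rowGet mas1 i 1 ≠ rowGet mas2 i 1 then sk ++ innerA mas1 (keyAt mas1 i) (i + 1)
  else sk

-- body of A's second (filtering) loop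
def stepFilter (mas1 : List (List Int)) (mas2 : List (List Int)) (sk : List Nat)
    (p : List (List Int) × List (List Int)) (i : Nat) : List (List Int) × List (List Int) :=
  if i ∈ sk then p else (p.1 ++ [mas1.getD i []], p.2 ++ [mas2.getD i []])

-- (the unused 'dic = {}' of A is dropped; it never affects the result)
def delete_extra (mas1 : List (List Int)) (mas2 : List (List Int)) : List (List Int) × List (List Int) :=
  let masSkip := (List.range mas1.length).foldl (stepSkip mas1 mas2) []
  (List.range mas1.length).foldl (stepFilter mas1 mas2 masSkip) ([], [])

-- ===== PORT B =====
-- B's single forward pass: state = (skipping flag, proto = key of the last kept mismatch row)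
def bLoop (mas1 : List (List Int)) (mas2 : List (List Int)) (i : Nat) (skipping : Bool)
    (proto : List Int) : List (List Int) × List (List Int) :=
  if _h : i < mas1.length then
    if skipping ∧ keyAt mas1 i = proto then bLoop mas1 mas2 (i + 1) skipping proto
    else
      let rest :=
        if rowGet mas1 i 1 ≠ rowGet mas2 i 1 then bLoop mas1 mas2 (i + 1) true (keyAt mas1 i)
        else bLoop mas1 mas2 (i + 1) false proto
      (mas1.getD i [] :: rest.1, mas2.getD i [] :: rest.2)
  else ([], [])
termination_by mas1.length - i

def delete_extra_alt (mas1 : List (List Int)) (mas2 : List (List Int)) : List (List Int) × List (List Int) :=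
  bLoop mas1 mas2 0 false []

-- ===== PRECONDITION & SPEC =====
-- Python A raises IndexError when it reaches a missing row or a row shorter than 2.  Pre_ is
-- slightly narrower than A's exact return set: it also excludes ragged inputs (short mas2, or a
-- short mas2 row) on which A happens to return only because every offending position was skipped;
-- B returns the same value on those (see claim.json cites).
def Pre_delete_extra (mas1 : List (List Int)) (mas2 : List (List Int)) : Prop :=
  mas1.length ≤ mas2.length ∧ (∀ r ∈ mas1, 2 ≤ r.length) ∧ (∀ r ∈ mas2.take mas1.length, 2 ≤ r.length)
instance (mas1 : List (List Int)) (mas2 : List (List Int)) : Decidable (Pre_delete_extra mas1 mas2) := by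
  unfold Pre_delete_extra; infer_instance

def pvWitness_delete_extra : List (List Int) × List (List Int) :=
  ([[1, 2], [1, 2], [3, 4]], [[1, 3], [9, 9], [3, 4]])

def Spec_delete_extra (mas1 : List (List Int)) (mas2 : List (List Int)) (out : List (List Int) × List (List Int)) : Prop := out = delete_extra_alt mas1 mas2
instance (mas1 : List (List Int)) (mas2 : List (List Int)) (out : List (List Int) × List (List Int)) : Decidable (Spec_delete_extra mas1 mas2 out) := by unfold Spec_delete_extra; infer_instance

-- ===== CLAIM (what is proved, stated in full; the proofs are below) =====
def Claim_equal_delete_extra : Prop := ∀ (mas1 : List (List Int)) (mas2 : List (List Int)), Dom_delete_extra mas1 mas2 → Pre_delete_extra mas1 mas2 → Spec_delete_extra mas1 mas2 (delete_extra mas1 mas2)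

-- ===== LEMMAS AND PROOFS =====
-- the set of indices B drops from position i onward in state (s, p)
def skipFrom (mas1 : List (List Int)) (mas2 : List (List Int)) (i : Nat) (s : Bool)
    (p : List Int) : List Nat :=
  if _h : i < mas1.length then
    if s ∧ keyAt mas1 i = p then i :: skipFrom mas1 mas2 (i + 1) s p
    else if rowGet mas1 i 1 ≠ rowGet mas2 i 1 then skipFrom mas1 mas2 (i + 1) true (keyAt mas1 i)
    else skipFrom mas1 mas2 (i + 1) false p
  else []
termination_by mas1.length - i

theorem skipFrom_ge (mas1 mas2 : List (List Int)) :
    ∀ (d i : Nat) (s : Bool) (p : List Int), d = mas1.length - i →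
      ∀ x ∈ skipFrom mas1 mas2 i s p, i ≤ x := by
  intro d
  induction d with
  | zero =>
    intro i s p hd x hx
    rw [skipFrom] at hx
    have : ¬ i < mas1.length := by omega
    simp [this] at hx
  | succ e ih =>
    intro i s p hd x hx
    rw [skipFrom] at hx
    by_cases h : i < mas1.length
    · simp only [h, dif_pos] at hx
      split_ifs at hx with h1 h2
      · rcases List.mem_cons.1 hx with rfl | hx'
        · exact le_refl x
        · have := ih (i+1) s p (by omega) x hx'; omega
      · have := ih (i+1) true (keyAt mas1 i) (by omega) x hx; omega
      · have := ih (i+1) false p (by omega) x hx; omega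
    · simp [h] at hx

theorem skip_loop_eq (mas1 mas2 : List (List Int)) :
    ∀ (d i : Nat) (s : Bool) (p : List Int) (pre : List Nat),
      d = mas1.length - i → (∀ x ∈ pre, x < i) →
      (List.range' i d).foldl (stepSkip mas1 mas2)
          (pre ++ (if s then innerA mas1 p i else [])) =
        pre ++ skipFrom mas1 mas2 i s p := by
  intro d
  induction d with
  | zero =>
    intro i s p pre hd hpre
    have hn : ¬ i < mas1.length := by omega
    rw [skipFrom]
    simp only [hn, List.range']
    cases s
    · simp
    · rw [innerA]; simp [hn]
  | succ e ih =>
    intro i s p pre hd hpre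
    have hn : i < mas1.length := by omega
    rw [List.range'_succ, List.foldl_cons, skipFrom]
    simp only [hn, dif_pos]
    by_cases hs : s = true ∧ keyAt mas1 i = p
    · obtain ⟨rfl, hk⟩ := hs
      have hinner : innerA mas1 p i = i :: innerA mas1 p (i + 1) := by
        rw [innerA]; simp [hn, hk]
      have hmem : i ∈ pre ++ (if true = true then innerA mas1 p i else []) := by
        simp [hinner]
      rw [stepSkip, if_pos hmem]
      rw [if_pos (show (true = true) ∧ keyAt mas1 i = p from ⟨rfl, hk⟩)]
      have H := ih (i+1) true p (pre ++ [i]) (by omega)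
        (by intro x hx; rcases List.mem_append.1 hx with h | h
            · exact Nat.lt_succ_of_lt (hpre x h)
            · simp at h; omega)
      simp only [reduceIte] at H ⊢
      have : pre ++ innerA mas1 p i = (pre ++ [i]) ++ innerA mas1 p (i+1) := by
        simp [hinner]
      rw [this, H]
      simp
    · -- accumulator is just pre
      have hacc : pre ++ (if s then innerA mas1 p i else []) = pre := by
        cases s
        · simp
        · have hk : ¬ keyAt mas1 i = p := by
            intro h; exact hs ⟨rfl, h⟩
          rw [innerA]; simp [hn, hk]
      rw [hacc]
      have hmem : i ∉ pre := fun h => absurd (hpre i h) (by omega)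
      rw [stepSkip, if_neg hmem]
      rw [if_neg hs]
      by_cases hm : rowGet mas1 i 1 ≠ rowGet mas2 i 1
      · rw [if_pos hm, if_pos hm]
        have H := ih (i+1) true (keyAt mas1 i) pre (by omega)
          (fun x hx => Nat.lt_succ_of_lt (hpre x hx))
        simp only [reduceIte] at H
        rw [H]
      · rw [if_neg hm, if_neg hm]
        have H := ih (i+1) false p pre (by omega)
          (fun x hx => Nat.lt_succ_of_lt (hpre x hx))
        simp only [Bool.false_eq_true, if_false, List.append_nil] at H
        rw [H]

theorem filter_loop_eq (mas1 mas2 : List (List Int)) (S : List Nat) :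
    ∀ (d i : Nat) (s : Bool) (p : List Int) (acc : List (List Int) × List (List Int)),
      d = mas1.length - i →
      (∀ j, i ≤ j → (j ∈ S ↔ j ∈ skipFrom mas1 mas2 i s p)) →
      (List.range' i d).foldl (stepFilter mas1 mas2 S) acc =
        (acc.1 ++ (bLoop mas1 mas2 i s p).1, acc.2 ++ (bLoop mas1 mas2 i s p).2) := by
  intro d
  induction d with
  | zero =>
    intro i s p acc hd hS
    have hn : ¬ i < mas1.length := by omega
    rw [bLoop]
    simp [hn]
  | succ e ih =>
    intro i s p acc hd hS
    have hn : i < mas1.length := by omega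
    rw [List.range'_succ, List.foldl_cons, bLoop]
    simp only [hn, dif_pos]
    by_cases hs : s = true ∧ keyAt mas1 i = p
    · have hskip : skipFrom mas1 mas2 i s p = i :: skipFrom mas1 mas2 (i+1) s p := by
        rw [skipFrom]; simp [hn, hs]
      have hmem : i ∈ S := by
        rw [hS i (le_refl i), hskip]; exact List.mem_cons_self
      rw [stepFilter, if_pos hmem, if_pos hs]
      exact ih (i+1) s p acc (by omega) (by
        intro j hj
        rw [hS j (by omega), hskip]
        simp only [List.mem_cons]
        constructor
        · rintro (rfl | h)
          · omega
          · exact h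
        · intro h; exact Or.inr h)
    · have hskip : skipFrom mas1 mas2 i s p =
          (if rowGet mas1 i 1 ≠ rowGet mas2 i 1 then skipFrom mas1 mas2 (i+1) true (keyAt mas1 i)
           else skipFrom mas1 mas2 (i+1) false p) := by
        rw [skipFrom]; simp [hn, hs]
      have hmem : i ∉ S := by
        rw [hS i (le_refl i), hskip]
        intro h
        split_ifs at h with hm
        · have := skipFrom_ge mas1 mas2 (mas1.length - (i+1)) (i+1) true (keyAt mas1 i) rfl i h
          omega
        · have := skipFrom_ge mas1 mas2 (mas1.length - (i+1)) (i+1) false p rfl i h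
          omega
      rw [stepFilter, if_neg hmem, if_neg hs]
      by_cases hm : rowGet mas1 i 1 ≠ rowGet mas2 i 1
      · rw [if_pos hm]
        have H := ih (i+1) true (keyAt mas1 i) (acc.1 ++ [mas1.getD i []], acc.2 ++ [mas2.getD i []])
          (by omega) (by
            intro j hj
            rw [hS j (by omega), hskip, if_pos hm])
        rw [H]
        simp
      · rw [if_neg hm]
        have H := ih (i+1) false p (acc.1 ++ [mas1.getD i []], acc.2 ++ [mas2.getD i []])
          (by omega) (by
            intro j hj
            rw [hS j (by omega), hskip, if_neg hm])
        rw [H]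
        simp


theorem delete_extra_eq (mas1 mas2 : List (List Int)) :
    delete_extra mas1 mas2 = delete_extra_alt mas1 mas2 := by
  simp only [delete_extra, delete_extra_alt]
  have h1 := skip_loop_eq mas1 mas2 mas1.length 0 false [] [] (by omega) (by simp)
  simp only [Bool.false_eq_true, if_false, List.append_nil, List.nil_append] at h1
  have h2 := filter_loop_eq mas1 mas2
      ((List.range' 0 mas1.length).foldl (stepSkip mas1 mas2) [])
      mas1.length 0 false [] ([], []) (by omega)
      (by intro j _; rw [h1])
  simp only [List.nil_append] at h2
  rw [List.range_eq_range', h2]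

theorem delete_extra_spec : Claim_equal_delete_extra := by
  intro mas1 mas2 _ _
  unfold Spec_delete_extra
  exact delete_extra_eq mas1 mas2
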